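-- pv_equiv track=rewrite | github.com/darthsuogles/phissenschaft | algo/swap_lex_order.py | swapLexOrderUsedOnce
-- ===== SOURCE A (Python) =====
-- def swapLexOrderUsedOnce(text, pairs):
--     ''' This version, you can only use each operation once
--     '''
--     if not pairs: return text
--     i, j = pairs[0]
--     _used = set([i, j])
--     rest_pairs = [[s, t] for s, t in pairs
--                   if s not in _used and t not in _used]
--
--     _chars = list(text)
--     _chars[i-1], _chars[j-1] = _chars[j-1], _chars[i-1]
--     text_with = swapLexOrderUsedOnce(''.join(_chars), rest_pairs)
--     _chars[i-1], _chars[j-1] = _chars[j-1], _chars[i-1]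
--     text_sans = swapLexOrderUsedOnce(''.join(_chars), pairs[1:])
--     return max(text_with, text_sans)
-- ===== SOURCE B (Python) =====
-- def swapLexOrderUsedOnce(text, pairs):
--     '''Explicit-stack DFS with a running best instead of binary recursion with max.'''
--     best = ''
--     stack = [(text, pairs)]
--     while stack:
--         cur, ps = stack.pop()
--         if not ps:
--             if cur > best:
--                 best = cur
--         else:
--             i, j = ps[0]
--             used = {i, j}
--             rest = [[s, t] for s, t in ps if s not in used and t not in used]
--             chars = list(cur)
--             chars[i-1], chars[j-1] = chars[j-1], chars[i-1]
--             stack.append((''.join(chars), rest))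
--             stack.append((cur, ps[1:]))
--     return best
-- ===== Notes on version B (the rewrite author's own statement) =====
-- stated objective: alternative
-- what changed: Replaces the binary recursion that combines the two recursive results with max by an iterative DFS over an explicit stack of (text, remaining-pairs) states that maintains a single running best string.
import Mathlib
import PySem

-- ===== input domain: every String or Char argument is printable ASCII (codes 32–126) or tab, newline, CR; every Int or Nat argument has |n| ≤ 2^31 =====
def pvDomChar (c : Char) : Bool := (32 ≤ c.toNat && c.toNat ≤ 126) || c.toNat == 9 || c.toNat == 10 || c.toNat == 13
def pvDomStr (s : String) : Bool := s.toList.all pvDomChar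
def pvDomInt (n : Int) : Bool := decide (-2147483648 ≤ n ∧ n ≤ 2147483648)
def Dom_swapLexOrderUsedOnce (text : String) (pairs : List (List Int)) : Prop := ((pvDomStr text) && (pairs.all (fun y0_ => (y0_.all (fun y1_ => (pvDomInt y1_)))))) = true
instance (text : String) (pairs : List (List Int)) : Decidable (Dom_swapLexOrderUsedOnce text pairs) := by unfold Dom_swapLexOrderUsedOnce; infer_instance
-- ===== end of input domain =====

-- B replaces A's binary recursion (max of two recursive calls) by an explicit-stack DFS
-- keeping a single running best string: same exponential search, different decomposition.

-- ===== PORT A =====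

-- termination helper: the filtered comprehension over l has at most l.length elements
lemma pvFoldrFilterLen_le {α β : Type} (f : α → Bool) (g : α → β) (l : List α) :
    (l.foldr (fun q acc => if f q then g q :: acc else acc) []).length ≤ l.length := by
  induction l with
  | nil => simp
  | cons a t ih => by_cases h : f a = true <;> simp [h] <;> omega

-- termination helper: i is a member of set([i, j])
lemma pvContains_left (i j : Int) :
    PySem.Set.contains (PySem.Set.ofList [i, j]) i = true := by
  simp [PySem.Set.mem_ofList]

-- termination helper: the head pair [i, j] is always dropped by the conflict filter
lemma pvRestPairsLen (p : List Int) (rest : List (List Int)) :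
    ((p :: rest).foldr (fun q acc =>
        if !(PySem.Set.contains (PySem.Set.ofList [p.getD 0 0, p.getD 1 0]) (q.getD 0 0))
           && !(PySem.Set.contains (PySem.Set.ofList [p.getD 0 0, p.getD 1 0]) (q.getD 1 0))
        then [q.getD 0 0, q.getD 1 0] :: acc else acc) []).length ≤ rest.length := by
  rw [List.foldr_cons, pvContains_left]
  simp only [Bool.not_true, Bool.false_and, Bool.false_eq_true, if_false]
  exact pvFoldrFilterLen_le _ _ rest

def swapLexOrderUsedOnce (text : String) (pairs : List (List Int)) : String :=
  match pairs with
  | [] => text                                      -- if not pairs: return text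
  | p :: rest =>
    let i : Int := p.getD 0 0                       -- i, j = pairs[0]  (Pre_ gives p.length = 2)
    let j : Int := p.getD 1 0
    let used : PySem.Set Int := PySem.Set.ofList [i, j]
    let rest_pairs : List (List Int) :=             -- [[s,t] for s,t in pairs if s not in _used and t not in _used]
      (p :: rest).foldr (fun q acc =>
        if !(PySem.Set.contains used (q.getD 0 0)) && !(PySem.Set.contains used (q.getD 1 0))
        then [q.getD 0 0, q.getD 1 0] :: acc else acc) []
    let chars := text.toList                        -- _chars = list(text)
    -- simultaneous swap _chars[i-1], _chars[j-1] = _chars[j-1], _chars[i-1]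
    -- (both reads from the original chars); Pre_ gives InRange, so the defaults are unreachable
    let swapped := PySem.List.pySetD (PySem.List.pySetD chars (i - 1) (PySem.List.pyGetD chars (j - 1) ' ')) (j - 1) (PySem.List.pyGetD chars (i - 1) ' ')
    let text_with := swapLexOrderUsedOnce (String.ofList swapped) rest_pairs
    -- A swaps back before the second call, so it receives the original text
    let text_sans := swapLexOrderUsedOnce text rest
    max text_with text_sans
termination_by pairs.length
decreasing_by
  · simp only [dite_eq_ite, List.length_cons]
    have := pvRestPairsLen p rest
    omega
  · simp

-- ===== PORT B =====

def pvStackMeasure (st : List (String × List (List Int))) : Nat :=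
  (st.map (fun s => 3 ^ s.2.length)).sum

def swapAltLoop (stack : List (String × List (List Int))) (best : String) : String :=
  match stack with
  | [] => best                                      -- while stack:  (done)
  | (cur, ps) :: rest =>                            -- cur, ps = stack.pop()
    match ps with
    | [] => swapAltLoop rest (if best < cur then cur else best)   -- if cur > best: best = cur
    | p :: ps' =>
      let i : Int := p.getD 0 0                     -- i, j = ps[0]
      let j : Int := p.getD 1 0
      let used : PySem.Set Int := PySem.Set.ofList [i, j]
      let rest_ps : List (List Int) :=              -- [[s,t] for s,t in ps if s not in used and t not in used]
        (p :: ps').foldr (fun q acc =>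
          if !(PySem.Set.contains used (q.getD 0 0)) && !(PySem.Set.contains used (q.getD 1 0))
          then [q.getD 0 0, q.getD 1 0] :: acc else acc) []
      let chars := cur.toList
      let swapped := PySem.List.pySetD (PySem.List.pySetD chars (i - 1) (PySem.List.pyGetD chars (j - 1) ' ')) (j - 1) (PySem.List.pyGetD chars (i - 1) ' ')
      -- push (swapped, rest_ps) then (cur, ps[1:]); pop takes the last pushed first
      swapAltLoop ((cur, ps') :: (String.ofList swapped, rest_ps) :: rest) best
termination_by pvStackMeasure stack
decreasing_by
  · simp only [pvStackMeasure, List.map, List.sum_cons, List.length_nil, pow_zero]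
    omega
  · simp only [dite_eq_ite, pvStackMeasure, List.map, List.sum_cons, List.length_cons]
    have hle := pvRestPairsLen p ps'
    have h1 : (3:Nat) ^ ((p :: ps').foldr (fun q acc =>
          if !(PySem.Set.contains (PySem.Set.ofList [p.getD 0 0, p.getD 1 0]) (q.getD 0 0))
             && !(PySem.Set.contains (PySem.Set.ofList [p.getD 0 0, p.getD 1 0]) (q.getD 1 0))
          then [q.getD 0 0, q.getD 1 0] :: acc else acc) []).length ≤ 3 ^ ps'.length :=
      Nat.pow_le_pow_right (by norm_num) hle
    have h3 : (0:Nat) < 3 ^ ps'.length := pow_pos (by norm_num : (0:Nat) < 3) _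
    omega

def swapLexOrderUsedOnce_alt (text : String) (pairs : List (List Int)) : String :=
  swapAltLoop [(text, pairs)] ""

-- ===== PRECONDITION & SPEC =====
-- Pre_: exactly the inputs on which the Python A returns: either no pairs, or every
-- pair has exactly two entries whose 1-based indices are in Python range for text
-- (otherwise A raises ValueError on unpacking or IndexError on the no-swap chain).
def Pre_swapLexOrderUsedOnce (text : String) (pairs : List (List Int)) : Prop :=
  pairs = [] ∨ ∀ q ∈ pairs, q.length = 2 ∧ ∀ x ∈ q, PySem.Raise.InRange text.toList.length (x - 1)
instance (text : String) (pairs : List (List Int)) : Decidable (Pre_swapLexOrderUsedOnce text pairs) := by unfold Pre_swapLexOrderUsedOnce; infer_instance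
def pvWitness_swapLexOrderUsedOnce : String × List (List Int) := ("abc", [[1, 3], [1, 2]])

def Spec_swapLexOrderUsedOnce (text : String) (pairs : List (List Int)) (out : String) : Prop := out = swapLexOrderUsedOnce_alt text pairs
instance (text : String) (pairs : List (List Int)) (out : String) : Decidable (Spec_swapLexOrderUsedOnce text pairs out) := by unfold Spec_swapLexOrderUsedOnce; infer_instance

-- ===== CLAIM (what is proved, stated in full; the proofs are below) =====
def Claim_equal_swapLexOrderUsedOnce : Prop := ∀ (text : String) (pairs : List (List Int)), Dom_swapLexOrderUsedOnce text pairs → Pre_swapLexOrderUsedOnce text pairs → Spec_swapLexOrderUsedOnce text pairs (swapLexOrderUsedOnce text pairs)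

-- ===== LEMMAS AND PROOFS =====

-- Python's 'if cur > best: best = cur' update is the max of the two strings
lemma pvIfMax (b c : String) : (if b < c then c else b) = max b c := by
  by_cases h : b < c
  · simp [h, max_eq_right h.le]
  · simp [h, max_eq_left (not_lt.1 h)]

-- the empty string is the bottom of the lexicographic order
lemma pvEmptyLe (s : String) : ("" : String) ≤ s := by
  rw [String.le_iff_toList_le]
  cases h : s.toList with
  | nil => simp
  | cons a t => exact le_of_lt (List.nil_lt_cons a t)

-- loop invariant: the stack loop folds a running max of A's value over the stack states
theorem swapAltLoop_eq (stack : List (String × List (List Int))) (best : String) :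
    swapAltLoop stack best = stack.foldl (fun b s => max b (swapLexOrderUsedOnce s.1 s.2)) best := by
  match stack with
  | [] => simp [swapAltLoop]
  | (cur, List.nil) :: rest =>
    rw [swapAltLoop, swapAltLoop_eq rest, pvIfMax]
    simp [swapLexOrderUsedOnce]
  | (cur, p :: ps') :: rest =>
    rw [swapAltLoop]
    rw [swapAltLoop_eq]
    rw [List.foldl_cons, List.foldl_cons, List.foldl_cons]
    congr 1
    conv_rhs => rw [swapLexOrderUsedOnce]
    rw [max_assoc, max_comm (swapLexOrderUsedOnce _ _)]
termination_by pvStackMeasure stack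
decreasing_by
  · simp only [pvStackMeasure, List.map, List.sum_cons, List.length_nil, pow_zero]
    omega
  · simp only [pvStackMeasure, List.map, List.sum_cons, List.length_cons]
    have hle := pvRestPairsLen p ps'
    have h1 : (3:Nat) ^ ((p :: ps').foldr (fun q acc =>
          if !(PySem.Set.contains (PySem.Set.ofList [p.getD 0 0, p.getD 1 0]) (q.getD 0 0))
             && !(PySem.Set.contains (PySem.Set.ofList [p.getD 0 0, p.getD 1 0]) (q.getD 1 0))
          then [q.getD 0 0, q.getD 1 0] :: acc else acc) []).length ≤ 3 ^ ps'.length :=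
      Nat.pow_le_pow_right (by norm_num) hle
    have h3 : (0:Nat) < 3 ^ ps'.length := pow_pos (by norm_num : (0:Nat) < 3) _
    omega

-- ===== VERDICT (by name: the statement is the Claim_ definition above) =====
theorem swapLexOrderUsedOnce_spec : Claim_equal_swapLexOrderUsedOnce := by
  intro text pairs _ _
  unfold Spec_swapLexOrderUsedOnce swapLexOrderUsedOnce_alt
  rw [swapAltLoop_eq]
  simp [max_eq_right (pvEmptyLe (swapLexOrderUsedOnce text pairs))]
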